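-- pv_equiv track=rewrite | github.com/rsango1708/pathplan | project_pp.py | generate_coordinates
-- ===== SOURCE A (Python) =====
-- import string
-- import itertools
--
-- def generate_coordinates(rows, cols):
--     pos = {}
--     letters = list(string.ascii_uppercase)  # A-Z
--
--     # Extend keys beyond Z (e.g., AA, AB, ...)
--     keys = []
--     for length in range(1, 3):  # Support up to 2-character column names
--         keys.extend([''.join(k) for k in itertools.product(letters, repeat=length)])
--
--     # Generate the coordinates
--     for y in range(rows):
--         for x in range(cols):
--             pos[keys[y*cols+x]] = (x, y)
--
--     return pos
-- ===== SOURCE B (Python) =====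
-- def _label(n):
--     # bijective base-26 label: 0->'A', 25->'Z', 26->'AA', ...
--     s = ""
--     while n >= 0:
--         s = chr(65 + n % 26) + s
--         n = n // 26 - 1
--     return s
--
-- def generate_coordinates(rows, cols):
--     pos = {}
--     for y in range(rows):
--         for x in range(cols):
--             pos[_label(y * cols + x)] = (x, y)
--     return pos
-- ===== Notes on version B (the rewrite author's own statement) =====
-- stated objective: simpler
-- what changed: B drops the precomputed 702-entry itertools.product key table and computes each column label directly from its flat index by bijective base-26 arithmetic.
import Mathlib
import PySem

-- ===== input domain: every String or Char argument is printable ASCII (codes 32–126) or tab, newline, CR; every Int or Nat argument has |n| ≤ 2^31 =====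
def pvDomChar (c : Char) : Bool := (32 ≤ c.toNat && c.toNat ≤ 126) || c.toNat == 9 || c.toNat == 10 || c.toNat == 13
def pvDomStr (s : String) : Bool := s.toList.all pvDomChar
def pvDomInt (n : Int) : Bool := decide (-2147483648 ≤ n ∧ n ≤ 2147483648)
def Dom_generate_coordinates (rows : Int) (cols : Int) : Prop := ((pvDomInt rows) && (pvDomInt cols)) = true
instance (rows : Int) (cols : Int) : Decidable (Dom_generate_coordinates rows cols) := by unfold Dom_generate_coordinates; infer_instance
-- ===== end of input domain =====

-- B replaces A's precomputed itertools.product key table with direct bijective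
-- base-26 computation of each label from its flat index (objective: simpler).


-- ===== PORT A =====
-- letters = list(string.ascii_uppercase)
def pvLetters : List String :=
  ["A","B","C","D","E","F","G","H","I","J","K","L","M",
   "N","O","P","Q","R","S","T","U","V","W","X","Y","Z"]

-- itertools.product(letters, repeat = n) (each tuple as a list of the picked strings)
def pvProdRep (xs : List String) : Nat → List (List String)
  | 0 => [[]]
  | n+1 => xs.flatMap (fun a => (pvProdRep xs n).map (fun t => a :: t))

-- keys = []; for length in range(1, 3): keys.extend([''.join(k) for k in product(letters, repeat=length)])
def pvKeys : List String :=
  (PySem.List.pyRange 1 3 1).foldl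
    (fun ks len => ks ++ ((pvProdRep pvLetters len.toNat).map (fun k => PySem.Str.join "" k))) []

def generate_coordinates (rows : Int) (cols : Int) : List (String × Int × Int) :=
  ((PySem.List.pyRange 0 rows 1).foldl (fun pos y =>
      (PySem.List.pyRange 0 cols 1).foldl (fun pos x =>
        -- pos[keys[y*cols+x]] = (x, y); total form pyGetD, in range under Pre_
        pos.insert (PySem.List.pyGetD pvKeys (y * cols + x) "") (x, y)) pos)
    (PySem.Dict.empty : PySem.Dict String (Int × Int))).items

-- ===== PORT B =====
-- the while loop of _label, fuel-structured for kernel reducibility (fuel n.toNat+2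
-- always suffices: n strictly decreases each step and one step below 26 ends the loop)
def pvLabelGo (fuel : Nat) (n : Int) (s : List Char) : List Char :=
  match fuel with
  | 0 => s
  | f+1 =>
    if 0 ≤ n then
      pvLabelGo f (PySem.Int.floordiv n 26 - 1) (Char.ofNat (65 + PySem.Int.mod n 26).toNat :: s)
    else s

def pvLabel (n : Int) : String := String.ofList (pvLabelGo (n.toNat + 2) n [])

def generate_coordinates_alt (rows : Int) (cols : Int) : List (String × Int × Int) :=
  ((PySem.List.pyRange 0 rows 1).foldl (fun pos y =>
      (PySem.List.pyRange 0 cols 1).foldl (fun pos x =>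
        pos.insert (pvLabel (y * cols + x)) (x, y)) pos)
    (PySem.Dict.empty : PySem.Dict String (Int × Int))).items

-- ===== PRECONDITION & SPEC =====
-- Pre_ excludes exactly the inputs where A raises IndexError (both sides positive and
-- more than 702 cells, so some flat index exceeds the 2-character key table).
def Pre_generate_coordinates (rows : Int) (cols : Int) : Prop :=
  rows ≤ 0 ∨ cols ≤ 0 ∨ rows * cols ≤ 702
instance (rows : Int) (cols : Int) : Decidable (Pre_generate_coordinates rows cols) := by
  unfold Pre_generate_coordinates; infer_instance

def pvWitness_generate_coordinates : Int × Int := (3, 4)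

def Spec_generate_coordinates (rows : Int) (cols : Int) (out : List (String × Int × Int)) : Prop := out = generate_coordinates_alt rows cols
instance (rows : Int) (cols : Int) (out : List (String × Int × Int)) : Decidable (Spec_generate_coordinates rows cols out) := by unfold Spec_generate_coordinates; infer_instance

-- ===== CLAIM (what is proved, stated in full; the proofs are below) =====
def Claim_equal_generate_coordinates : Prop := ∀ (rows : Int) (cols : Int), Dom_generate_coordinates rows cols → Pre_generate_coordinates rows cols → Spec_generate_coordinates rows cols (generate_coordinates rows cols)

-- ===== LEMMAS AND PROOFS =====

-- the two key computations agree on every index the 2-character table covers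
set_option maxRecDepth 100000 in
set_option maxHeartbeats 4000000 in
theorem pvKey_eq_label_nat : ∀ m ∈ List.range 702,
    PySem.List.pyGetD pvKeys (m : Int) "" = pvLabel (m : Int) := by decide

theorem pvKey_eq_label (n : Int) (h0 : 0 ≤ n) (h1 : n < 702) :
    PySem.List.pyGetD pvKeys n "" = pvLabel n := by
  have h := pvKey_eq_label_nat n.toNat (List.mem_range.mpr (by omega))
  rwa [Int.toNat_of_nonneg h0] at h

-- ===== VERDICT (by name: the statement is the Claim_ definition above) =====
theorem generate_coordinates_spec : Claim_equal_generate_coordinates := by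
  intro rows cols _ hpre
  unfold Spec_generate_coordinates generate_coordinates generate_coordinates_alt
  apply congrArg PySem.Dict.items
  apply PySem.List.foldl_congr_mem
  intro pos y hy
  apply PySem.List.foldl_congr_mem
  intro pos' x hx
  rw [PySem.List.mem_pyRange_one] at hy hx
  have hn : y * cols + x < 702 := by
    rcases hpre with h | h | h
    · omega
    · omega
    · nlinarith [hy.1, hy.2, hx.1, hx.2]
  rw [pvKey_eq_label (y * cols + x) (by nlinarith [hy.1, hx.1]) hn]
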